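-- pv_equiv track=rewrite | github.com/A1exStanis/PythonProjects | prime_with_descr.py | prime_with_des
-- ===== SOURCE A (Python) =====
-- def prime_with_des(x):
--     dividers = []
--     primes = []
--     is_prime = True
--     numbers = range(1, x)
--     for i in numbers:
--         if x % i == 0:
--             dividers.append(i)
--             is_prime = False
--     return f'Is prime:{is_prime}, got dividers {dividers}'
-- ===== SOURCE B (Python) =====
-- def prime_with_des(x):
--     # Trial division up to sqrt(x): each divisor d <= sqrt(x) pairs with x // d.
--     if x < 2:
--         return 'Is prime:True, got dividers []'
--     divs = []
--     d = 1
--     while d * d <= x: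
--         if x % d == 0:
--             divs.append(d)
--             q = x // d
--             if q != d and q != x:
--                 divs.append(q)
--         d += 1
--     divs.sort()
--     return f'Is prime:False, got dividers {divs}'
-- ===== Notes on version B (the rewrite author's own statement) =====
-- stated objective: faster
-- what changed: Replaces the linear scan of all i in 1..x-1 by trial division up to sqrt(x) that collects each small divisor together with its paired quotient x//d and sorts the result; the primality flag (which A sets to False whenever any divisor, including 1, exists) becomes the closed-form test x >= 2.
import Mathlib
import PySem

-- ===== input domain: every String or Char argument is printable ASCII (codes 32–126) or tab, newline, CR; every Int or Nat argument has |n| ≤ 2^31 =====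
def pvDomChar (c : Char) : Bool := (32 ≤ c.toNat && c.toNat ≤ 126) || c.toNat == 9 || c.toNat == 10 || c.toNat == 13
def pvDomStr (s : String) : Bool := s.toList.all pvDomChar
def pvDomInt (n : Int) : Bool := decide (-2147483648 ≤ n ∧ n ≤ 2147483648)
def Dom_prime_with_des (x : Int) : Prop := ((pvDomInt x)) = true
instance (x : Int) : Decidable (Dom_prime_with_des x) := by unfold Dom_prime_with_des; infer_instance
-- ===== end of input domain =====

-- B replaces A's linear scan over 1..x-1 by trial division up to √x with paired quotients, then sorts (objective: faster).

-- Python's f-string rendering of a list of ints, shared by both ports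
def pvListRepr (l : List Int) : String :=
  "[" ++ PySem.Str.join ", " (l.map PySem.Int.toStr) ++ "]"

-- ===== PORT A =====
def prime_with_des (x : Int) : String :=
  let st := (PySem.List.pyRange 1 x 1).foldl
      (fun (st : List Int × Bool) i =>
        if PySem.Int.mod x i = 0 then (st.1 ++ [i], false) else st)
      ([], true)
  "Is prime:" ++ (if st.2 then "True" else "False") ++ ", got dividers " ++ pvListRepr st.1

-- ===== PORT B =====
-- the while-loop of Source B: d counts up while d*d ≤ x, collecting d and its paired quotient x//d
-- (the Nat fuel only makes the loop structurally total; it never runs out while d*d ≤ x)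
def pvCollectAux (x : Int) : Nat → Int → List Int → List Int
  | 0, _, acc => acc
  | n + 1, d, acc =>
    if d * d ≤ x then
      pvCollectAux x n (d + 1)
        (if PySem.Int.mod x d = 0 then
          (if PySem.Int.floordiv x d ≠ d ∧ PySem.Int.floordiv x d ≠ x
           then (acc ++ [d]) ++ [PySem.Int.floordiv x d]
           else acc ++ [d])
         else acc)
    else acc

def pvCollect (x d : Int) (acc : List Int) : List Int :=
  pvCollectAux x (x + 1 - d).toNat d acc

def prime_with_des_alt (x : Int) : String :=
  if x < 2 then "Is prime:True, got dividers []"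
  else
    "Is prime:False, got dividers " ++
      pvListRepr (PySem.List.sorted (pvCollect x 1 []) (fun v => v) false)

-- ===== PRECONDITION & SPEC =====
def Spec_prime_with_des (x : Int) (out : String) : Prop := out = prime_with_des_alt x
instance (x : Int) (out : String) : Decidable (Spec_prime_with_des x out) := by unfold Spec_prime_with_des; infer_instance

-- ===== CLAIM (what is proved, stated in full; the proofs are below) =====
def Claim_equal_prime_with_des : Prop := ∀ (x : Int), Dom_prime_with_des x → Spec_prime_with_des x (prime_with_des x)

-- ===== LEMMAS AND PROOFS =====

-- the divisor set B's loop still has to emit from step d on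
def pvTodo (x d m : Int) : Prop := m ∣ x ∧ m ≠ x ∧ d ≤ m ∧ d ≤ x / m

lemma pvTodo_mono {x d m : Int} (h : pvTodo x (d + 1) m) : pvTodo x d m := by
  obtain ⟨h1, h2, h3, h4⟩ := h
  exact ⟨h1, h2, by omega, by omega⟩

lemma pvCollect_step (x d : Int) (acc : List Int) (h : d * d ≤ x) :
    pvCollect x d acc = pvCollect x (d + 1)
      (if PySem.Int.mod x d = 0 then
        (if PySem.Int.floordiv x d ≠ d ∧ PySem.Int.floordiv x d ≠ x
         then (acc ++ [d]) ++ [PySem.Int.floordiv x d]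
         else acc ++ [d])
       else acc) := by
  have hdd : d ≤ d * d := by nlinarith [sq_nonneg d, sq_nonneg (d - 1)]
  have hn : (x + 1 - d).toNat = (x + 1 - (d + 1)).toNat + 1 := by omega
  unfold pvCollect
  rw [hn]
  simp [pvCollectAux, h]

lemma pvCollect_stop (x d : Int) (acc : List Int) (h : ¬ d * d ≤ x) :
    pvCollect x d acc = acc := by
  unfold pvCollect
  cases hn : (x + 1 - d).toNat with
  | zero => rfl
  | succ n => simp [pvCollectAux, h]

lemma foldA (x : Int) (l : List Int) (acc : List Int) (b : Bool) :
    l.foldl (fun (st : List Int × Bool) i =>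
        if PySem.Int.mod x i = 0 then (st.1 ++ [i], false) else st) (acc, b)
    = (acc ++ l.filter (fun i => decide (PySem.Int.mod x i = 0)),
       b && !(l.any (fun i => decide (PySem.Int.mod x i = 0)))) := by
  induction l generalizing acc b with
  | nil => simp
  | cons a t ih =>
    by_cases h : PySem.Int.mod x a = 0 <;>
      simp [List.foldl_cons, h, ih, List.any_cons]

lemma mem_pvCollect (x : Int) (hx : 2 ≤ x) :
    ∀ (d : Int) (acc : List Int), 1 ≤ d →
      ∀ m, m ∈ pvCollect x d acc ↔ m ∈ acc ∨ pvTodo x d m := by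
  suffices haux : ∀ (n : Nat) (d : Int) (acc : List Int), 1 ≤ d → (x + 1 - d).toNat = n →
      ∀ m, m ∈ pvCollect x d acc ↔ m ∈ acc ∨ pvTodo x d m by
    exact fun d acc hd m => haux (x + 1 - d).toNat d acc hd rfl m
  intro n
  induction n with
  | zero =>
    intro d acc hd hn m
    have hdx : x < d := by omega
    have hstop : ¬ d * d ≤ x := by nlinarith
    rw [pvCollect_stop x d acc hstop]
    constructor
    · exact Or.inl
    · rintro (hm | ⟨h1, h2, h3, h4⟩)
      · exact hm
      · have hml : m ≤ x := Int.le_of_dvd (by omega) h1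
        omega
  | succ n ihn =>
    intro d acc hd hn m
    by_cases h : d * d ≤ x
    case neg =>
      rw [pvCollect_stop x d acc h]
      constructor
      · exact Or.inl
      · rintro (hm | ⟨h1, h2, h3, h4⟩)
        · exact hm
        · exfalso
          have hmx : m * (x / m) = x := Int.mul_ediv_cancel' h1
          have : d * d ≤ m * (x / m) := mul_le_mul h3 h4 (by omega) (by omega)
          rw [hmx] at this
          exact h this
    have hd0 : (0 : Int) < d := by omega
    have hdlex : d ≤ x := le_trans (by nlinarith [sq_nonneg (d - 1)]) h
    have ih : ∀ (acc' : List Int) (m : Int),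
        m ∈ pvCollect x (d + 1) acc' ↔ m ∈ acc' ∨ pvTodo x (d + 1) m :=
      fun acc' => ihn (d + 1) acc' (by omega) (by omega)
    have hdne : d ≠ x := by rintro rfl; nlinarith
    have hddle : d ≤ x / d := (Int.le_ediv_iff_mul_le hd0).mpr h
    rw [pvCollect_step x d acc h]
    by_cases hdvd : PySem.Int.mod x d = 0
    · have hdvd' : d ∣ x := (PySem.Int.mod_eq_zero_iff_dvd x d).mp hdvd
      have hqe : PySem.Int.floordiv x d = x / d := PySem.Int.floordiv_eq_ediv_of_pos hd0
      have hxqd : x / d * d = x := Int.ediv_mul_cancel hdvd'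
      have hq0 : 0 < x / d := by nlinarith
      have hqdvd : x / d ∣ x := ⟨d, hxqd.symm⟩
      have hxq : x / (x / d) = d := by
        have h' := Int.mul_ediv_cancel_left (a := x / d) d (ne_of_gt hq0)
        rwa [hxqd] at h' 
      rw [if_pos hdvd, hqe]
      by_cases hqc : x / d ≠ d ∧ x / d ≠ x
      · rw [if_pos hqc]
        rw [ih _ m]
        constructor
        · rintro (hm | htodo)
          · simp only [List.mem_append, List.mem_singleton] at hm
            rcases hm with (hm | hm2) | hm3
            · exact Or.inl hm
            · exact Or.inr (by rw [hm2]; exact ⟨hdvd', hdne, le_refl d, hddle⟩)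
            · exact Or.inr (by rw [hm3]; exact ⟨hqdvd, hqc.2, hddle, by rw [hxq]⟩)
          · exact Or.inr (pvTodo_mono htodo)
        · rintro (hm | ⟨h1, h2, h3, h4⟩)
          · exact Or.inl (by simp [hm])
          · by_cases hmd : m = d
            · subst hmd; exact Or.inl (by simp)
            · by_cases hmq : x / m = d
              · have hmm : x / m * m = x := Int.ediv_mul_cancel h1
                have hdm : x = d * m := by rw [← hmq]; exact hmm.symm
                have hdq : d * (x / d) = x := by rw [mul_comm]; exact hxqd
                have : m = x / d :=
                  mul_left_cancel₀ (by omega : d ≠ 0) (hdm.symm.trans hdq.symm)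
                exact Or.inl (by simp [this])
              · exact Or.inr ⟨h1, h2, by omega, by omega⟩
      · rw [if_neg hqc]
        rw [ih _ m]
        push_neg at hqc
        constructor
        · rintro (hm | htodo)
          · simp only [List.mem_append, List.mem_singleton] at hm
            rcases hm with hm | hm2
            · exact Or.inl hm
            · exact Or.inr (by rw [hm2]; exact ⟨hdvd', hdne, le_refl d, hddle⟩)
          · exact Or.inr (pvTodo_mono htodo)
        · rintro (hm | ⟨h1, h2, h3, h4⟩)
          · exact Or.inl (by simp [hm])
          · by_cases hmd : m = d
            · subst hmd; exact Or.inl (by simp)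
            · by_cases hmq : x / m = d
              · have hmm : x / m * m = x := Int.ediv_mul_cancel h1
                have hdm : x = d * m := by rw [← hmq]; exact hmm.symm
                have hdq : d * (x / d) = x := by rw [mul_comm]; exact hxqd
                have hmqd : m = x / d :=
                  mul_left_cancel₀ (by omega : d ≠ 0) (hdm.symm.trans hdq.symm)
                rcases (em (x / d = d)) with he | he
                · exact absurd (hmqd.trans he) hmd
                · have : x / d = x := hqc he
                  exact absurd (hmqd.trans this) h2
              · exact Or.inr ⟨h1, h2, by omega, by omega⟩
    · rw [if_neg hdvd]
      rw [ih _ m]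
      constructor
      · rintro (hm | htodo)
        · exact Or.inl hm
        · exact Or.inr (pvTodo_mono htodo)
      · rintro (hm | ⟨h1, h2, h3, h4⟩)
        · exact Or.inl hm
        · by_cases hmd : m = d
          · subst hmd; exact absurd ((PySem.Int.mod_eq_zero_iff_dvd x m).mpr h1) hdvd
          · by_cases hmq : x / m = d
            · have hmm : x / m * m = x := Int.ediv_mul_cancel h1
              have : d ∣ x := ⟨m, by rw [← hmq]; exact hmm.symm⟩
              exact absurd ((PySem.Int.mod_eq_zero_iff_dvd x d).mpr this) hdvd
            · exact Or.inr ⟨h1, h2, by omega, by omega⟩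

lemma nodup_pvCollect (x : Int) (hx : 2 ≤ x) :
    ∀ (d : Int) (acc : List Int), 1 ≤ d → acc.Nodup →
      (∀ m ∈ acc, ¬ pvTodo x d m) → (pvCollect x d acc).Nodup := by
  suffices haux : ∀ (n : Nat) (d : Int) (acc : List Int), 1 ≤ d → (x + 1 - d).toNat = n →
      acc.Nodup → (∀ m ∈ acc, ¬ pvTodo x d m) → (pvCollect x d acc).Nodup by
    exact fun d acc hd => haux (x + 1 - d).toNat d acc hd rfl
  intro n
  induction n with
  | zero =>
    intro d acc hd hn hnd _
    have hdx : x < d := by omega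
    have hstop : ¬ d * d ≤ x := by nlinarith
    rw [pvCollect_stop x d acc hstop]
    exact hnd
  | succ n ihn =>
    intro d acc hd hn hnd hdisj
    by_cases h : d * d ≤ x
    case neg =>
      rw [pvCollect_stop x d acc h]
      exact hnd
    have hd0 : (0 : Int) < d := by omega
    have hdlex : d ≤ x := le_trans (by nlinarith [sq_nonneg (d - 1)]) h
    have ih : ∀ (acc' : List Int), acc'.Nodup →
        (∀ m ∈ acc', ¬ pvTodo x (d + 1) m) → (pvCollect x (d + 1) acc').Nodup :=
      fun acc' => ihn (d + 1) acc' (by omega) (by omega)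
    have hdne : d ≠ x := by rintro rfl; nlinarith
    have hddle : d ≤ x / d := (Int.le_ediv_iff_mul_le hd0).mpr h
    rw [pvCollect_step x d acc h]
    by_cases hdvd : PySem.Int.mod x d = 0
    · have hdvd' : d ∣ x := (PySem.Int.mod_eq_zero_iff_dvd x d).mp hdvd
      have hqe : PySem.Int.floordiv x d = x / d := PySem.Int.floordiv_eq_ediv_of_pos hd0
      have hxqd : x / d * d = x := Int.ediv_mul_cancel hdvd'
      have hq0 : 0 < x / d := by nlinarith
      have hqdvd : x / d ∣ x := ⟨d, hxqd.symm⟩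
      have hxq : x / (x / d) = d := by
        have h' := Int.mul_ediv_cancel_left (a := x / d) d (ne_of_gt hq0)
        rwa [hxqd] at h' 
      have hdacc : d ∉ acc := fun hmem =>
        hdisj d hmem ⟨hdvd', hdne, le_refl d, hddle⟩
      rw [if_pos hdvd, hqe]
      by_cases hqc : x / d ≠ d ∧ x / d ≠ x
      · have hqacc : x / d ∉ acc := fun hmem =>
          hdisj (x / d) hmem ⟨hqdvd, hqc.2, hddle, by rw [hxq]⟩
        rw [if_pos hqc]
        refine ih _ ?_ ?_
        · simp [List.nodup_append, hnd, Ne.symm hqc.1]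
          intro a ha
          exact ⟨fun e => hdacc (e ▸ ha), fun e => hqacc (e ▸ ha)⟩
        · intro m hm
          simp only [List.mem_append, List.mem_singleton] at hm
          rcases hm with (hm | rfl) | rfl
          · exact fun ht => hdisj m hm (pvTodo_mono ht)
          · rintro ⟨_, _, h3, _⟩; omega
          · rintro ⟨_, _, _, h4⟩; rw [hxq] at h4; omega
      · rw [if_neg hqc]
        refine ih _ ?_ ?_
        · simp [List.nodup_append, hnd]
          intro a ha e
          exact hdacc (e ▸ ha)
        · intro m hm
          simp only [List.mem_append, List.mem_singleton] at hm
          rcases hm with hm | rfl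
          · exact fun ht => hdisj m hm (pvTodo_mono ht)
          · rintro ⟨_, _, h3, _⟩; omega
    · rw [if_neg hdvd]
      exact ih _ hnd (fun m hm ht => hdisj m hm (pvTodo_mono ht))

lemma filter_perm_collect (x : Int) (hx : 2 ≤ x) :
    ((PySem.List.pyRange 1 x 1).filter
        (fun i => decide (PySem.Int.mod x i = 0))).Perm (pvCollect x 1 []) := by
  have hnd1 : ((PySem.List.pyRange 1 x 1).filter
      (fun i => decide (PySem.Int.mod x i = 0))).Nodup :=
    List.Nodup.filter _ (PySem.List.nodup_pyRange_one 1 x)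
  have hnd2 : (pvCollect x 1 []).Nodup :=
    nodup_pvCollect x hx 1 [] le_rfl List.nodup_nil (by simp)
  rw [List.perm_ext_iff_of_nodup hnd1 hnd2]
  intro m
  rw [mem_pvCollect x hx 1 [] le_rfl m]
  simp only [List.mem_filter, PySem.List.mem_pyRange_one, List.not_mem_nil, false_or,
    decide_eq_true_eq, PySem.Int.mod_eq_zero_iff_dvd, pvTodo]
  constructor
  · rintro ⟨⟨h1, h2⟩, h3⟩
    refine ⟨h3, by omega, h1, ?_⟩
    exact (Int.le_ediv_iff_mul_le (by omega : (0:Int) < m)).mpr (by omega)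
  · rintro ⟨h1, h2, h3, h4⟩
    have hml : m ≤ x := Int.le_of_dvd (by omega) h1
    exact ⟨⟨h3, by omega⟩, h1⟩

-- ===== VERDICT (by name: the statement is the Claim_ definition above) =====
theorem prime_with_des_spec : Claim_equal_prime_with_des := by
  intro x _
  unfold Spec_prime_with_des prime_with_des prime_with_des_alt
  by_cases hx : x < 2
  · rw [if_pos hx]
    have hnil : PySem.List.pyRange 1 x 1 = [] := PySem.List.pyRange_one_eq_nil (by omega)
    rw [hnil]
    simp only [List.foldl_nil]
    decide
  · rw [if_neg hx]
    have h2 : (2 : Int) ≤ x := by omega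
    simp only [foldA]
    have hany : (PySem.List.pyRange 1 x 1).any (fun i => decide (PySem.Int.mod x i = 0)) = true := by
      rw [List.any_eq_true]
      exact ⟨1, PySem.List.mem_pyRange_one.mpr ⟨le_rfl, by omega⟩,
        by simp⟩
    have hsorted : PySem.List.sorted (pvCollect x 1 []) (fun v => v) false
        = (PySem.List.pyRange 1 x 1).filter (fun i => decide (PySem.Int.mod x i = 0)) :=
      PySem.List.sorted_eq_of_perm_of_pairwise_lt _ _ _
        (filter_perm_collect x h2)
        (List.Pairwise.filter _ (PySem.List.pairwise_lt_pyRange_one 1 x))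
    rw [hsorted, hany]
    simp only [List.nil_append]
    congr 1
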